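-- pv_equiv track=rewrite | github.com/sotojorge803/Assignment-2-CSCI-210 | binary.py | signExtend
-- ===== SOURCE A (Python) =====
-- def signExtend(bitString, bits):
--    bitList = list(bitString)
--    newBitString = bitString [::-1]
--    while len(bitList) < bits:
--       if bitList[0] == '1':
--          newBitString += '1'
--       elif bitList[0] == '0':
--          newBitString += '0'
--       bitList.append(1)
--    returnBitString = newBitString [::-1]
--    return returnBitString
-- ===== SOURCE B (Python) =====
-- def signExtend(bitString, bits):
--     n = bits - len(bitString)
--     if n <= 0:
--         return bitString
--     c = bitString[0]
--     if c == '0' or c == '1':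
--         return c * n + bitString
--     return bitString
-- ===== Notes on version B (the rewrite author's own statement) =====
-- stated objective: simpler
-- what changed: Replaces A's double string reversal and per-iteration while-loop accumulation with a closed-form construction: compute the pad length once and prepend first_char * n directly.
import Mathlib
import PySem

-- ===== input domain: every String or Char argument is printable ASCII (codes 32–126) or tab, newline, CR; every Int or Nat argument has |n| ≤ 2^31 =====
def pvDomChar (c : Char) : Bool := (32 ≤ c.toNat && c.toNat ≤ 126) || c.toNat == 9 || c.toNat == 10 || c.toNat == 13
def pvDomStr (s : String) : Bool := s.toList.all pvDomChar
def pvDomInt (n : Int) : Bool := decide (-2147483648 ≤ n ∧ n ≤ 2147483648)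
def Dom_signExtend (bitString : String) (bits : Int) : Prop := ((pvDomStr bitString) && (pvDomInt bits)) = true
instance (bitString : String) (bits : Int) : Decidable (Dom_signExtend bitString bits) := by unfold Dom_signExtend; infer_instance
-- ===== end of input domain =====

-- B replaces A's while-loop accumulation and double reversal with a closed-form
-- prepend of first_char * n; objective: simpler. Pre_ excludes only the inputs
-- where A raises IndexError (empty string with bits > 0).


-- ===== PORT A =====
-- the while loop: state is bitList's length (appends only change the length; index 0
-- stays the original first char, read here through head?) and the accumulator string.
-- When the string is empty and the loop runs, Python raises IndexError (excluded by Pre_);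
-- the port falls through without padding there.
def signExtendLoopA (c0 : Option Char) (len : Nat) (bits : Int) (acc : List Char) : List Char :=
  if h : (len : Int) < bits then
    let acc' :=
      if c0 = some '1' then acc ++ ['1']
      else if c0 = some '0' then acc ++ ['0']
      else acc
    signExtendLoopA c0 (len + 1) bits acc'
  else acc
termination_by (bits - len).toNat
decreasing_by omega

def signExtend (bitString : String) (bits : Int) : String :=
  let bitList := bitString.toList
  let newBitString := bitString.toList.reverse   -- bitString[::-1]
  let res := signExtendLoopA bitList.head? bitList.length bits newBitString
  String.ofList res.reverse                           -- newBitString[::-1]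

-- ===== PORT B =====
def signExtend_alt (bitString : String) (bits : Int) : String :=
  let n := bits - (bitString.toList.length : Int)
  if n ≤ 0 then bitString
  else
    match bitString.toList.head? with
    | some c =>
      if c = '0' ∨ c = '1' then String.ofList (List.replicate n.toNat c ++ bitString.toList)
      else bitString
    | none => bitString   -- unreachable under Pre_ (Python B raises IndexError here)

-- ===== PRECONDITION & SPEC =====
-- Pre_ excludes exactly the inputs where A raises IndexError: empty bitString with bits > 0.
def Pre_signExtend (bitString : String) (bits : Int) : Prop :=
  bitString = "" → bits ≤ 0
instance (bitString : String) (bits : Int) : Decidable (Pre_signExtend bitString bits) := by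
  unfold Pre_signExtend; infer_instance

def pvWitness_signExtend : String × Int := ("10", 5)

def Spec_signExtend (bitString : String) (bits : Int) (out : String) : Prop := out = signExtend_alt bitString bits
instance (bitString : String) (bits : Int) (out : String) : Decidable (Spec_signExtend bitString bits out) := by unfold Spec_signExtend; infer_instance

-- ===== CLAIM (what is proved, stated in full; the proofs are below) =====
def Claim_equal_signExtend : Prop := ∀ (bitString : String) (bits : Int), Dom_signExtend bitString bits → Pre_signExtend bitString bits → Spec_signExtend bitString bits (signExtend bitString bits)

-- ===== LEMMAS AND PROOFS =====

-- the loop returns its accumulator as soon as the length reaches the target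
theorem loopA_stop (c0 : Option Char) (len : Nat) (bits : Int) (acc : List Char)
    (h : ¬ ((len : Int) < bits)) : signExtendLoopA c0 len bits acc = acc := by
  rw [signExtendLoopA]; simp [h]

-- when the first char is '0' or '1', the loop appends exactly (bits - len)⁺ copies of it
theorem loopA_pad (c : Char) (hc : c = '0' ∨ c = '1') :
    ∀ (k len : Nat) (bits : Int) (acc : List Char), (bits - len).toNat = k →
      signExtendLoopA (some c) len bits acc = acc ++ List.replicate k c := by
  intro k
  induction k with
  | zero =>
    intro len bits acc hk
    rw [signExtendLoopA]
    have : ¬ ((len : Int) < bits) := by omega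
    simp [this]
  | succ n ih =>
    intro len bits acc hk
    rw [signExtendLoopA]
    have hlt : (len : Int) < bits := by omega
    have hk' : (bits - (len + 1 : Nat)).toNat = n := by push_cast; omega
    rcases hc with h | h <;> subst h <;>
      simp only [hlt, dite_true, if_true, Option.some.injEq] <;>
      · rw [ih (len + 1) bits _ hk']
        simp [List.replicate_succ, List.append_assoc]

-- when the first char is neither '0' nor '1' (or the string is empty), no padding is added
theorem loopA_nopad (c0 : Option Char) (h0 : c0 ≠ some '0') (h1 : c0 ≠ some '1') :
    ∀ (k len : Nat) (bits : Int) (acc : List Char), (bits - len).toNat = k →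
      signExtendLoopA c0 len bits acc = acc := by
  intro k
  induction k with
  | zero =>
    intro len bits acc hk
    rw [signExtendLoopA]
    have : ¬ ((len : Int) < bits) := by omega
    simp [this]
  | succ n ih =>
    intro len bits acc hk
    rw [signExtendLoopA]
    have hlt : (len : Int) < bits := by omega
    have hk' : (bits - (len + 1 : Nat)).toNat = n := by push_cast; omega
    simp only [hlt, dite_true, h0, h1, if_false]
    exact ih (len + 1) bits acc hk'

-- ===== VERDICT (by name: the statement is the Claim_ definition above) =====
theorem signExtend_spec : Claim_equal_signExtend := by
  intro bitString bits _ hpre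
  unfold Spec_signExtend
  show signExtend bitString bits = signExtend_alt bitString bits
  show String.ofList (signExtendLoopA bitString.toList.head? bitString.toList.length bits
        bitString.toList.reverse).reverse =
    (if bits - (bitString.toList.length : Int) ≤ 0 then bitString
     else
       match bitString.toList.head? with
       | some c =>
         if c = '0' ∨ c = '1' then
           String.ofList (List.replicate (bits - (bitString.toList.length : Int)).toNat c
             ++ bitString.toList)
         else bitString
       | none => bitString)
  by_cases hle : bits - (bitString.toList.length : Int) ≤ 0
  · rw [loopA_stop _ _ _ _ (by omega), List.reverse_reverse, if_pos hle,
        String.ofList_toList]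
  · have hne : bitString.toList ≠ [] := by
      intro h
      have hempty : bitString = "" := by
        simpa [String.ofList_toList] using congrArg String.ofList h
      have := hpre hempty
      rw [h] at hle
      simp at hle
      omega
    obtain ⟨c, rest, hcons⟩ := List.exists_cons_of_ne_nil hne
    have hhead : bitString.toList.head? = some c := by rw [hcons]; rfl
    rw [hhead, if_neg hle]
    by_cases hc : c = '0' ∨ c = '1'
    · rw [loopA_pad c hc ((bits - bitString.toList.length).toNat) _ _ _ rfl]
      simp [hc, List.reverse_append]
    · have hc0 : c ≠ '0' := fun h => hc (Or.inl h)
      have hc1 : c ≠ '1' := fun h => hc (Or.inr h)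
      rw [loopA_nopad (some c) (by simpa using hc0) (by simpa using hc1)
            ((bits - bitString.toList.length).toNat) _ _ _ rfl,
          List.reverse_reverse, String.ofList_toList]
      simp [hc]
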